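-- pv_equiv track=rewrite | github.com/Smlep/Google-Hash-Code-2k19 | graph.py | treeze
-- ===== SOURCE A (Python) =====
-- def treeze(l, t):
--     ex = [0, 0]
--     for e in l:
--         for en in e:
--             if t[0] == en:
--                 ex[0] += 1
--             if t[1] == en:
--                 ex[1] += 1
--     return max(ex) > 1 or (t[1], t[0]) in l
-- ===== SOURCE B (Python) =====
-- def treeze(l, t):
--     ends = [en for e in l for en in e]
--
--     def twice(x):
--         try:
--             i = ends.index(x)
--         except ValueError:
--             return False
--         return x in ends[i + 1:]
--
--     return twice(t[0]) or twice(t[1]) or (t[1], t[0]) in l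
-- ===== Notes on version B (the rewrite author's own statement) =====
-- stated objective: alternative
-- what changed: B never counts: it flattens the endpoints once and decides 'appears twice' by locating the first occurrence with list.index and testing membership in the remaining suffix, replacing A's two interleaved arithmetic accumulators with a find-then-search-rest decomposition.
import Mathlib
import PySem

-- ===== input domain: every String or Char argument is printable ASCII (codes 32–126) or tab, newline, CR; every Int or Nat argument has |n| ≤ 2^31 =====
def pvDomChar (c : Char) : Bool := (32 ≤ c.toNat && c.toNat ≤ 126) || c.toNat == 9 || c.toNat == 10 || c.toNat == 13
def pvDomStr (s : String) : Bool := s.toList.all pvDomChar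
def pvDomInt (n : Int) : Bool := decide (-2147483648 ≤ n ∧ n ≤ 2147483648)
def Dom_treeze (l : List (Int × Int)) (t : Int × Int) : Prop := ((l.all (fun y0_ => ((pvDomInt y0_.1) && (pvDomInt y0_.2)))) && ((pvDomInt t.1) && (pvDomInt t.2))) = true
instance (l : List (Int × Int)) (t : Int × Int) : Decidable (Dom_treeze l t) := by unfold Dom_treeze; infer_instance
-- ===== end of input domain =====

-- B decides "endpoint appears twice" by find-first-then-search-the-rest instead of A's counting accumulators; same O(n) cost.


-- ===== PORT A =====
-- body of A's outer loop: the inner 'for en in e' over the tuple's two endpoints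
def treezeStep (t : Int × Int) (ex : Int × Int) (e : Int × Int) : Int × Int :=
  [e.1, e.2].foldl (fun ex en =>
    let ex := if t.1 == en then (ex.1 + 1, ex.2) else ex
    if t.2 == en then (ex.1, ex.2 + 1) else ex) ex

def treeze (l : List (Int × Int)) (t : Int × Int) : Bool :=
  let ex : Int × Int := l.foldl (treezeStep t) (0, 0)
  decide (max ex.1 ex.2 > 1) || l.contains (t.2, t.1)

-- ===== PORT B =====
-- B's helper 'twice': first occurrence via list.index, then membership in the suffix after it
def twiceIn (ends : List Int) (x : Int) : Bool :=
  match PySem.List.index? ends x with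
  | none => false
  | some i => (PySem.List.slice ends (some ((i : Int) + 1)) none).contains x

def treeze_alt (l : List (Int × Int)) (t : Int × Int) : Bool :=
  let ends := l.flatMap (fun e => [e.1, e.2])
  twiceIn ends t.1 || twiceIn ends t.2 || l.contains (t.2, t.1)

-- ===== PRECONDITION & SPEC =====
def Spec_treeze (l : List (Int × Int)) (t : Int × Int) (out : Bool) : Prop := out = treeze_alt l t
instance (l : List (Int × Int)) (t : Int × Int) (out : Bool) : Decidable (Spec_treeze l t out) := by unfold Spec_treeze; infer_instance

-- ===== CLAIM (what is proved, stated in full; the proofs are below) =====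
def Claim_equal_treeze : Prop := ∀ (l : List (Int × Int)) (t : Int × Int), Dom_treeze l t → Spec_treeze l t (treeze l t)

-- ===== LEMMAS AND PROOFS =====

-- A's accumulator counts occurrences of t.1 / t.2 among the flattened endpoints.
theorem treezeStep_count (t ex e : Int × Int) :
    treezeStep t ex e
    = (ex.1 + ([e.1, e.2].count t.1 : Int), ex.2 + ([e.1, e.2].count t.2 : Int)) := by
  obtain ⟨x, y⟩ := e
  obtain ⟨a, b⟩ := ex
  obtain ⟨c, d⟩ := t
  simp only [treezeStep, List.foldl_cons, List.foldl_nil, List.count_cons, List.count_nil,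
    beq_iff_eq]
  split_ifs <;> simp only [Prod.mk.injEq] <;> push_cast <;> omega

theorem treeze_foldl_count (t : Int × Int) (l : List (Int × Int)) (ex : Int × Int) :
    l.foldl (treezeStep t) ex
    = (ex.1 + ((l.flatMap (fun e => [e.1, e.2])).count t.1 : Int),
       ex.2 + ((l.flatMap (fun e => [e.1, e.2])).count t.2 : Int)) := by
  induction l generalizing ex with
  | nil => simp
  | cons e l ih =>
    rw [List.foldl_cons, ih, treezeStep_count]
    simp only [List.flatMap_cons, List.count_append]
    simp only [Prod.mk.injEq]
    omega

-- B's find-then-search-rest test is exactly 'count > 1'.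
theorem twiceIn_eq_count (ends : List Int) (x : Int) :
    twiceIn ends x = decide (1 < ends.count x) := by
  unfold twiceIn
  rcases h : PySem.List.index? ends x with _ | i
  · have hx : x ∉ ends := (PySem.List.index?_eq_none_iff ends x).mp h
    simp [List.count_eq_zero_of_not_mem hx]
  · obtain ⟨pre, suf, hsplit, hlen, hnotpre⟩ := (PySem.List.index?_eq_some_iff ends x i).mp h
    subst hsplit hlen
    dsimp only
    rw [show ((pre.length : Int) + 1) = ((pre.length + 1 : Nat) : Int) by push_cast; ring,
      PySem.List.slice_from_natCast]
    have hdrop : (pre ++ x :: suf).drop (pre.length + 1) = suf := by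
      simp [List.drop_append]
    rw [hdrop]
    have hc : (pre ++ x :: suf).count x = suf.count x + 1 := by
      simp [List.count_append, List.count_eq_zero_of_not_mem hnotpre, List.count_cons_self]
    rw [hc]
    rcases Decidable.em (x ∈ suf) with hm | hm
    · simp [hm, Nat.lt_iff_add_one_le, List.count_pos_iff.mpr hm]
    · simp [hm, List.count_eq_zero_of_not_mem hm]

theorem treeze_eq (l : List (Int × Int)) (t : Int × Int) : treeze l t = treeze_alt l t := by
  simp only [treeze, treeze_alt, treeze_foldl_count, twiceIn_eq_count, zero_add]
  congr 1
  rcases Nat.lt_or_ge 1 ((l.flatMap (fun e => [e.1, e.2])).count t.1) with h | h <;>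
    rcases Nat.lt_or_ge 1 ((l.flatMap (fun e => [e.1, e.2])).count t.2) with h2 | h2 <;>
      simp_all

-- ===== VERDICT (by name: the statement is the Claim_ definition above) =====
theorem treeze_spec : Claim_equal_treeze := by
  intro l t _
  exact treeze_eq l t
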